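-- pv_equiv track=rewrite | github.com/thanhan92-f1/CLARA-Care | services/api/src/clara_api/api/v1/endpoints/research.py | _stage_from_events
-- ===== SOURCE A (Python) =====
-- from typing import Any
--
-- def _stage_from_events(events: list[dict[str, Any]]) -> list[dict[str, Any]]:
--     stage_map: dict[str, dict[str, Any]] = {}
--     for event in events:
--         stage = str(event.get("stage") or "").strip()
--         if not stage:
--             continue
--         item = stage_map.get(stage) or {
--             "id": stage,
--             "label": stage.replace("_", " ").title(),
--             "status": "pending",
--             "detail": "",
--             "source": "flow_events",
--         }
--         event_status = str(event.get("status") or "").strip().lower() or "pending"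
--         item["status"] = event_status
--         if isinstance(event.get("note"), str) and event.get("note"):
--             item["detail"] = event["note"]
--         stage_map[stage] = item
--     return list(stage_map.values())
-- ===== SOURCE B (Python) =====
-- def _stage_from_events(events):
--     # group events by stage (first-appearance order), then reduce each group
--     groups = {}
--     for event in events:
--         stage = str(event.get("stage") or "").strip()
--         if stage:
--             groups.setdefault(stage, []).append(event)
--     result = []
--     for stage, evs in groups.items():
--         status = "pending"
--         detail = ""
--         for ev in evs:
--             status = str(ev.get("status") or "").strip().lower() or "pending"
--             note = ev.get("note")
--             if isinstance(note, str) and note: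
--                 detail = note
--         result.append({
--             "id": stage,
--             "label": stage.replace("_", " ").title(),
--             "status": status,
--             "detail": detail,
--             "source": "flow_events",
--         })
--     return result
-- ===== Notes on version B (the rewrite author's own statement) =====
-- stated objective: alternative
-- what changed: Replaces A's single overwrite-accumulator loop over a dict of item dicts by a group-then-reduce: one pass groups events per stage with setdefault (first-appearance order), a second pass folds each group into a (status, detail) pair and builds the item dict once.
import Mathlib
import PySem

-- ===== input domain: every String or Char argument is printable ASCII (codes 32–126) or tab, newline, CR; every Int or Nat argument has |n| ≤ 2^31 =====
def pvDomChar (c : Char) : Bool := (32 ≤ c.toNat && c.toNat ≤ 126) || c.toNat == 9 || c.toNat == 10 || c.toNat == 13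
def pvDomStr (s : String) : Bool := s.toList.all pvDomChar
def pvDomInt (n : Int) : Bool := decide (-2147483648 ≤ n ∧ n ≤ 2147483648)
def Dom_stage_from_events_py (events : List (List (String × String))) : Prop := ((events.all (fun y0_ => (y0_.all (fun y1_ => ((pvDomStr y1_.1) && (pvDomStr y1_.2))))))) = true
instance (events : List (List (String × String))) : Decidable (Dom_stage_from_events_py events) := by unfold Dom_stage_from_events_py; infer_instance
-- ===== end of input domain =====

-- B replaces A's single overwrite-accumulator loop by a group-then-reduce (group events per
-- stage, then fold each group into a (status, detail) pair); same output, no speed claim.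

-- ===== PORT A =====
-- shared helpers for subexpressions that occur verbatim in BOTH Python sources:
-- str(event.get("stage") or "").strip()   ('or ""' collapses None and "" to "")
def pvStageOf (ev : List (String × String)) : String :=
  PySem.Str.strip ((PySem.Dict.mk ev).getD "stage" "")
-- str(event.get("status") or "").strip().lower() or "pending"
def pvStatusOf (ev : List (String × String)) : String :=
  let t := PySem.Str.lower (PySem.Str.strip ((PySem.Dict.mk ev).getD "status" ""))
  if t = "" then "pending" else t
-- s.title(), ported by hand: exact on the printable-ASCII domain, where Python 'cased' = isalpha
def pvTitleGo : Bool → List Char → List Char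
  | _, [] => []
  | prev, c :: rest =>
    if PySem.Chars.isalpha c then
      (if prev then PySem.Chars.lowerChar c else PySem.Chars.upperChar c) :: pvTitleGo true rest
    else c :: pvTitleGo false rest
def pvTitle (s : String) : String := String.ofList (pvTitleGo false s.toList)
-- A's default item dict literal (distinct literal keys)
def pvDefault (stage : String) : List (String × String) :=
  [("id", stage), ("label", pvTitle (PySem.Str.replace stage "_" " ")),
   ("status", "pending"), ("detail", ""), ("source", "flow_events")]

-- A's loop body on one event: item["status"] = …; if note: item["detail"] = note
def pvItemStep (item : PySem.Dict String String) (ev : List (String × String)) :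
    PySem.Dict String String :=
  let item := item.insert "status" (pvStatusOf ev)
  match (PySem.Dict.mk ev).get? "note" with
  | some n => if n ≠ "" then item.insert "detail" n else item
  | none => item

def pvStepA (m : PySem.Dict String (PySem.Dict String String)) (ev : List (String × String)) :
    PySem.Dict String (PySem.Dict String String) :=
  let stage := pvStageOf ev
  if stage = "" then m
  else
    -- 'stage_map.get(stage) or {…}': stored item dicts are never empty, so 'or' = None-check
    let item := match m.get? stage with
      | some it => it
      | none => PySem.Dict.mk (pvDefault stage)
    m.insert stage (pvItemStep item ev)

def stage_from_events_py (events : List (List (String × String))) : List (List (String × String)) :=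
  ((events.foldl pvStepA PySem.Dict.empty).values).map PySem.Dict.items

-- ===== PORT B =====
-- first pass: groups.setdefault(stage, []).append(event)  (= modify stage [] (· ++ [event]))
def pvStepG (g : PySem.Dict String (List (List (String × String)))) (ev : List (String × String)) :
    PySem.Dict String (List (List (String × String))) :=
  let stage := pvStageOf ev
  if stage = "" then g else g.modify stage [] (· ++ [ev])

-- second pass, inner reduction over one group: status/detail accumulator pair
def pvPairStep (acc : String × String) (ev : List (String × String)) : String × String :=
  (pvStatusOf ev,
   match (PySem.Dict.mk ev).get? "note" with
   | some n => if n ≠ "" then n else acc.2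
   | none => acc.2)

-- the item dict literal B appends for one (stage, events) group
def pvBuild (stage : String) (p : String × String) : List (String × String) :=
  [("id", stage), ("label", pvTitle (PySem.Str.replace stage "_" " ")),
   ("status", p.1), ("detail", p.2), ("source", "flow_events")]

def stage_from_events_py_alt (events : List (List (String × String))) :
    List (List (String × String)) :=
  let groups := events.foldl pvStepG PySem.Dict.empty
  groups.items.map (fun p => pvBuild p.1 (p.2.foldl pvPairStep ("pending", "")))

-- ===== PRECONDITION & SPEC =====
def Spec_stage_from_events_py (events : List (List (String × String))) (out : List (List (String × String))) : Prop := out = stage_from_events_py_alt events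
instance (events : List (List (String × String))) (out : List (List (String × String))) : Decidable (Spec_stage_from_events_py events out) := by unfold Spec_stage_from_events_py; infer_instance

-- ===== CLAIM (what is proved, stated in full; the proofs are below) =====
def Claim_equal_stage_from_events_py : Prop := ∀ (events : List (List (String × String))), Dom_stage_from_events_py events → Spec_stage_from_events_py events (stage_from_events_py events)

-- ===== LEMMAS AND PROOFS =====

-- the value A holds for a stage after seeing the group 'evs' is B's built dict for that group
def pvR (s : String) (evs : List (List (String × String))) : PySem.Dict String String :=
  PySem.Dict.mk (pvBuild s (evs.foldl pvPairStep ("pending", "")))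

def pvF (p : String × List (List (String × String))) : String × PySem.Dict String String :=
  (p.1, pvR p.1 p.2)

lemma pv_ins_status (s : String) (p : String × String) (x : String) :
    (PySem.Dict.mk (pvBuild s p)).insert "status" x = PySem.Dict.mk (pvBuild s (x, p.2)) := by
  apply PySem.Dict.ext
  simp [pvBuild, PySem.Dict.items_insert]

lemma pv_ins_detail (s : String) (p : String × String) (y : String) :
    (PySem.Dict.mk (pvBuild s p)).insert "detail" y = PySem.Dict.mk (pvBuild s (p.1, y)) := by
  apply PySem.Dict.ext
  simp [pvBuild, PySem.Dict.items_insert]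

lemma pvItemStep_build (s : String) (p : String × String) (ev : List (String × String)) :
    pvItemStep (PySem.Dict.mk (pvBuild s p)) ev = PySem.Dict.mk (pvBuild s (pvPairStep p ev)) := by
  unfold pvItemStep pvPairStep
  rw [pv_ins_status]
  cases h : (PySem.Dict.mk ev).get? "note" with
  | none => rfl
  | some n =>
    by_cases hn : n = "" <;> simp [hn, pv_ins_detail]

lemma pvR_append (s : String) (evs : List (List (String × String))) (ev : List (String × String)) :
    pvItemStep (pvR s evs) ev = pvR s (evs ++ [ev]) := by
  simp [pvR, List.foldl_append, pvItemStep_build]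

lemma pvR_nil (s : String) : PySem.Dict.mk (pvDefault s) = pvR s [] := rfl

lemma pv_get?_map (l : List (String × List (List (String × String)))) (s : String) :
    (PySem.Dict.mk (l.map pvF)).get? s = ((PySem.Dict.mk l).get? s).map (pvR s) := by
  induction l with
  | nil => simp [PySem.Dict.get?]
  | cons p rest ih =>
    rw [List.map_cons]
    rcases p with ⟨k, evs⟩
    rw [pvF, PySem.Dict.get?_mk_cons, PySem.Dict.get?_mk_cons]
    by_cases hk : k = s
    · subst hk; simp [pvR]
    · simp [hk, ih]

lemma pv_step (g : PySem.Dict String (List (List (String × String)))) (ev : List (String × String)) :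
    (pvStepA (PySem.Dict.mk (g.items.map pvF)) ev).items = (pvStepG g ev).items.map pvF := by
  unfold pvStepA pvStepG
  by_cases hs : pvStageOf ev = ""
  · simp [hs]
  · simp only [hs, ite_false]
    rw [show (g.modify (pvStageOf ev) [] (· ++ [ev]))
          = g.insert (pvStageOf ev) (g.getD (pvStageOf ev) [] ++ [ev]) from rfl]
    have hget : (PySem.Dict.mk (g.items.map pvF)).get? (pvStageOf ev)
        = (g.get? (pvStageOf ev)).map (pvR (pvStageOf ev)) := pv_get?_map g.items (pvStageOf ev)
    have hcont : (PySem.Dict.mk (g.items.map pvF)).contains (pvStageOf ev) = g.contains (pvStageOf ev) := by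
      rw [PySem.Dict.contains_eq_isSome_get?, PySem.Dict.contains_eq_isSome_get?, hget]
      cases g.get? (pvStageOf ev) <;> rfl
    cases hc : g.get? (pvStageOf ev) with
    | none =>
      have hgc : g.contains (pvStageOf ev) = false := by
        rw [PySem.Dict.contains_eq_isSome_get?, hc]; rfl
      rw [PySem.Dict.items_insert, PySem.Dict.items_insert, hcont, hgc, hget, hc]
      simp only [Option.map_none, Bool.false_eq_true, if_false, List.map_append, List.map_cons,
        List.map_nil]
      rw [PySem.Dict.getD_eq_get?_getD, hc]
      simp only [Option.getD_none]
      have : pvItemStep (PySem.Dict.mk (pvDefault (pvStageOf ev))) ev = pvR (pvStageOf ev) [ev] := by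
        rw [pvR_nil]
        exact pvR_append (pvStageOf ev) [] ev
      simp [pvF, this]
    | some evs =>
      have hgc : g.contains (pvStageOf ev) = true := by
        rw [PySem.Dict.contains_eq_isSome_get?, hc]; rfl
      rw [PySem.Dict.items_insert, PySem.Dict.items_insert, hcont, hgc, hget, hc]
      simp only [Option.map_some, if_true]
      rw [PySem.Dict.getD_of_get?_eq_some (d := g) (k := pvStageOf ev) (v := evs) (d0 := []) hc]
      rw [List.map_map, List.map_map]
      apply List.map_congr_left
      intro p _
      by_cases hp : p.1 == pvStageOf ev
      · simp [Function.comp, pvF, hp, pvR_append]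
      · simp [Function.comp, pvF, hp]

lemma pv_inv (events : List (List (String × String))) :
    ∀ (g : PySem.Dict String (List (List (String × String))))
      (m : PySem.Dict String (PySem.Dict String String)),
      m.items = g.items.map pvF →
      (events.foldl pvStepA m).items = ((events.foldl pvStepG g).items).map pvF := by
  induction events with
  | nil => intro g m h; simpa using h
  | cons ev rest ih =>
    intro g m h
    rw [List.foldl_cons, List.foldl_cons]
    have hm : m = PySem.Dict.mk (g.items.map pvF) := PySem.Dict.ext h
    exact ih (pvStepG g ev) (pvStepA m ev) (by rw [hm]; exact pv_step g ev)

-- ===== VERDICT (by name: the statement is the Claim_ definition above) =====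
theorem stage_from_events_py_spec : Claim_equal_stage_from_events_py := by
  intro events _
  unfold Spec_stage_from_events_py stage_from_events_py stage_from_events_py_alt
  have h := pv_inv events PySem.Dict.empty PySem.Dict.empty rfl
  simp only [PySem.Dict.values]
  rw [h, List.map_map, List.map_map]
  apply List.map_congr_left
  intro p _
  rfl
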